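-- pv_equiv track=rewrite | github.com/sndnyang/zhimind | wsgi/mindmap/utility.py | meta_parse
-- ===== SOURCE A (Python) =====
-- def meta_parse(content):
--     title = ''
--     tags = ''
--     summary = ''
--     slug = ''
--     meta_lines = content.split("\n")[:10]
--     for line in meta_lines:
--         l = line.lower()
--         if not l.find('summary'):
--             summary = l.split(":")[1].strip()
--         elif not l.find('tags'):
--             tags = ' '.join(l.split(":")[1].split(","))
--         elif not l.find('title'):
--             title = l.split(":")[1].strip()
--         elif not l.find('slug'):
--             slug = l.split(":")[1].strip()
--
--     return title, tags, summary, slug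
-- ===== SOURCE B (Python) =====
-- def meta_parse(content):
--     # Different decomposition: one scan per field over the first ten lines,
--     # keeping the value of the last line whose lowercased form starts with the keyword.
--     lines = content.split("\n")[:10]
--
--     def last(kw, extract):
--         val = ''
--         for line in lines:
--             l = line.lower()
--             if l.startswith(kw):
--                 val = extract(l)
--         return val
--
--     def col(l):
--         return l.split(":")[1]
--
--     title = last('title', lambda l: col(l).strip())
--     tags = last('tags', lambda l: ' '.join(col(l).split(',')))
--     summary = last('summary', lambda l: col(l).strip())
--     slug = last('slug', lambda l: col(l).strip())
--     return title, tags, summary, slug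
-- ===== Notes on version B (the rewrite author's own statement) =====
-- stated objective: alternative
-- what changed: A's single pass with an if/elif chain updating four variables is replaced by four independent per-field scans of the first ten lines, each keeping the extraction from the last line whose lowercased form starts with that field's keyword.
import Mathlib
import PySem

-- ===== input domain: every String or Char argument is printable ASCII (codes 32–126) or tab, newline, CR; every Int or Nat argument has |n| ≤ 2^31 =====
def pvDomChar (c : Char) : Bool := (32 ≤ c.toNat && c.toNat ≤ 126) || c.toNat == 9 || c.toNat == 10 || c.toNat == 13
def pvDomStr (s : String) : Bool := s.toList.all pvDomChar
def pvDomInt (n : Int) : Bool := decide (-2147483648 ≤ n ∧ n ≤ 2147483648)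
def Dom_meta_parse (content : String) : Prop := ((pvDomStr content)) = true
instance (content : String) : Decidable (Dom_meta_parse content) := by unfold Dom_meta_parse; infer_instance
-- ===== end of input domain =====

-- B replaces A's single branching pass by one scan per field (last match wins); objective: alternative decomposition, same cost.

-- ===== PORT A =====
def metaStepA (st : String × String × String × String) (line : String) :
    String × String × String × String :=
  let l := PySem.Str.lower line
  if PySem.Str.find l "summary" == 0 then
    (st.1, st.2.1,
      PySem.Str.strip ((PySem.List.pyGet? ((PySem.Str.split? l ":").getD []) 1).getD ""),
      st.2.2.2)
  else if PySem.Str.find l "tags" == 0 then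
    (st.1,
      PySem.Str.join " "
        ((PySem.Str.split? ((PySem.List.pyGet? ((PySem.Str.split? l ":").getD []) 1).getD "") ",").getD []),
      st.2.2.1, st.2.2.2)
  else if PySem.Str.find l "title" == 0 then
    (PySem.Str.strip ((PySem.List.pyGet? ((PySem.Str.split? l ":").getD []) 1).getD ""),
      st.2.1, st.2.2.1, st.2.2.2)
  else if PySem.Str.find l "slug" == 0 then
    (st.1, st.2.1, st.2.2.1,
      PySem.Str.strip ((PySem.List.pyGet? ((PySem.Str.split? l ":").getD []) 1).getD ""))
  else st

def meta_parse (content : String) : String × String × String × String :=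
  let meta_lines := PySem.List.slice ((PySem.Str.split? content "\n").getD []) none (some 10)
  meta_lines.foldl metaStepA ("", "", "", "")

-- ===== PORT B =====
-- value of the last of `lines` whose lowercased form starts with kw, extracted; '' if none
def metaScan (lines : List String) (kw : String) (extract : String → String) : String :=
  lines.foldl
    (fun v line =>
      let l := PySem.Str.lower line
      if PySem.Str.startswith l kw then extract l else v) ""

def colPart (l : String) : String :=
  (PySem.List.pyGet? ((PySem.Str.split? l ":").getD []) 1).getD ""

def meta_parse_alt (content : String) : String × String × String × String :=
  let lines := PySem.List.slice ((PySem.Str.split? content "\n").getD []) none (some 10)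
  (metaScan lines "title" (fun l => PySem.Str.strip (colPart l)),
   metaScan lines "tags" (fun l => PySem.Str.join " " ((PySem.Str.split? (colPart l) ",").getD [])),
   metaScan lines "summary" (fun l => PySem.Str.strip (colPart l)),
   metaScan lines "slug" (fun l => PySem.Str.strip (colPart l)))

-- ===== PRECONDITION & SPEC =====
-- Pre_ excludes exactly the inputs on which Python A raises IndexError: a line among the
-- first ten that starts (lowercased) with one of the four keywords but contains no ':'.
def Pre_meta_parse (content : String) : Prop :=
  ∀ line ∈ PySem.List.slice ((PySem.Str.split? content "\n").getD []) none (some 10),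
    (PySem.Str.startswith (PySem.Str.lower line) "summary" = true ∨
     PySem.Str.startswith (PySem.Str.lower line) "tags" = true ∨
     PySem.Str.startswith (PySem.Str.lower line) "title" = true ∨
     PySem.Str.startswith (PySem.Str.lower line) "slug" = true) →
    PySem.Str.isIn ":" line = true

instance (content : String) : Decidable (Pre_meta_parse content) := by
  unfold Pre_meta_parse; infer_instance

def pvWitness_meta_parse : String := "Title: Hello\nTags: a, b\nSummary: s\nSlug: x\nbody"

def Spec_meta_parse (content : String) (out : String × String × String × String) : Prop :=
  out = meta_parse_alt content
instance (content : String) (out : String × String × String × String) :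
    Decidable (Spec_meta_parse content out) := by unfold Spec_meta_parse; infer_instance

-- ===== CLAIM (what is proved, stated in full; the proofs are below) =====
def Claim_equal_meta_parse : Prop :=
  ∀ (content : String), Dom_meta_parse content → Pre_meta_parse content →
    Spec_meta_parse content (meta_parse content)

-- ===== LEMMAS AND PROOFS =====

-- the step function of one of B's per-field scans
def metaStepB (kw : String) (extract : String → String) (v : String) (line : String) : String :=
  let l := PySem.Str.lower line
  if PySem.Str.startswith l kw then extract l else v

theorem metaScan_eq_foldl (lines : List String) (kw : String) (extract : String → String) :
    metaScan lines kw extract = lines.foldl (metaStepB kw extract) "" := rfl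

theorem find_eq_zero_iff_prefix (s sub : List Char) :
    PySem.Chars.find s sub = 0 ↔ sub <+: s := by
  constructor
  · intro h
    have h0 : (0 : Int) ≤ PySem.Chars.find s sub := by omega
    have := (PySem.Chars.find_spec h0).1
    simpa [h] using this
  · intro h
    have h0 : (0 : Int) ≤ PySem.Chars.find s sub :=
      (PySem.Chars.find_nonneg_iff s sub).mpr (List.IsPrefix.isInfix h)
    have hspec := (PySem.Chars.find_spec h0).2
    by_contra hne
    have hpos : 0 < (PySem.Chars.find s sub).toNat := by omega
    exact hspec 0 hpos (by simpa using h)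

theorem find_beq_zero (l kw : String) :
    (PySem.Str.find l kw == 0) = PySem.Str.startswith l kw := by
  simp only [PySem.Str.find, PySem.Str.startswith]
  rw [Bool.eq_iff_iff, beq_iff_eq, find_eq_zero_iff_prefix, PySem.Chars.startswith_iff]

theorem not_both_prefix {α : Type} (p1 p2 cs : List α)
    (h1 : ¬ p1 <+: p2) (h2 : ¬ p2 <+: p1) : ¬ (p1 <+: cs ∧ p2 <+: cs) := by
  rintro ⟨a, b⟩
  rcases List.prefix_or_prefix_of_prefix a b with h | h
  · exact h1 h
  · exact h2 h

theorem startswith_excl (cs k1 k2 : List Char)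
    (h1 : ¬ k1 <+: k2) (h2 : ¬ k2 <+: k1)
    (hs : PySem.Chars.startswith cs k1 = true) : PySem.Chars.startswith cs k2 = false := by
  rcases hb : PySem.Chars.startswith cs k2 with _ | _
  · rfl
  · exact absurd ⟨(PySem.Chars.startswith_iff _ _).mp hs, (PySem.Chars.startswith_iff _ _).mp hb⟩
      (not_both_prefix _ _ _ h1 h2)

theorem metaStepA_eq (t g s u line : String) :
    metaStepA (t, g, s, u) line =
      (metaStepB "title" (fun l => PySem.Str.strip (colPart l)) t line,
       metaStepB "tags" (fun l => PySem.Str.join " " ((PySem.Str.split? (colPart l) ",").getD [])) g line,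
       metaStepB "summary" (fun l => PySem.Str.strip (colPart l)) s line,
       metaStepB "slug" (fun l => PySem.Str.strip (colPart l)) u line) := by
  simp only [metaStepA, metaStepB, colPart, find_beq_zero, PySem.Str.startswith,
    PySem.Str.toList_lower]
  by_cases hS : PySem.Chars.startswith (PySem.Chars.lower line.toList)
      ['s', 'u', 'm', 'm', 'a', 'r', 'y'] = true
  · have h1 := startswith_excl _ _ ['t', 'a', 'g', 's'] (by decide) (by decide) hS
    have h2 := startswith_excl _ _ ['t', 'i', 't', 'l', 'e'] (by decide) (by decide) hS
    have h3 := startswith_excl _ _ ['s', 'l', 'u', 'g'] (by decide) (by decide) hS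
    simp [hS, h1, h2, h3]
  · by_cases hG : PySem.Chars.startswith (PySem.Chars.lower line.toList) ['t', 'a', 'g', 's'] = true
    · have h2 := startswith_excl _ _ ['t', 'i', 't', 'l', 'e'] (by decide) (by decide) hG
      have h3 := startswith_excl _ _ ['s', 'l', 'u', 'g'] (by decide) (by decide) hG
      simp [hS, hG, h2, h3]
    · by_cases hT : PySem.Chars.startswith (PySem.Chars.lower line.toList)
          ['t', 'i', 't', 'l', 'e'] = true
      · have h3 := startswith_excl _ _ ['s', 'l', 'u', 'g'] (by decide) (by decide) hT
        simp [hS, hG, hT, h3]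
      · by_cases hU : PySem.Chars.startswith (PySem.Chars.lower line.toList)
            ['s', 'l', 'u', 'g'] = true
        · simp [hS, hG, hT, hU]
        · simp [hS, hG, hT, hU]

theorem foldl_split4 (lines : List String) :
    ∀ (t g s u : String),
      lines.foldl metaStepA (t, g, s, u) =
        (lines.foldl (metaStepB "title" (fun l => PySem.Str.strip (colPart l))) t,
         lines.foldl (metaStepB "tags"
            (fun l => PySem.Str.join " " ((PySem.Str.split? (colPart l) ",").getD []))) g,
         lines.foldl (metaStepB "summary" (fun l => PySem.Str.strip (colPart l))) s,
         lines.foldl (metaStepB "slug" (fun l => PySem.Str.strip (colPart l))) u) := by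
  induction lines with
  | nil => intro t g s u; rfl
  | cons line rest ih =>
      intro t g s u
      simp only [List.foldl_cons, metaStepA_eq]
      exact ih _ _ _ _

-- ===== VERDICT (by name: the statement is the Claim_ definition above) =====
theorem meta_parse_spec : Claim_equal_meta_parse := by
  intro content _ _
  unfold Spec_meta_parse meta_parse meta_parse_alt
  simp only [metaScan_eq_foldl]
  exact foldl_split4 _ "" "" "" ""
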